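-- pv_equiv track=rewrite | github.com/Krishnakant-Pal/DSA | Number_Theory/reversing-the-equation.py | reverseEqn
-- ===== SOURCE A (Python) =====
-- def reverseEqn(s):
--     operator = ["+","-","*","/"]
--     temp = ""
--     stack = []
--     for i in s:
--         if i in operator:
--            stack.append(temp)
--            temp = ""
--            stack.append(i)
--         else:
--             temp = temp + i
--     stack.append(temp)
--     res = "".join(stack[::-1])
--     return res
-- ===== SOURCE B (Python) =====
-- def reverseEqn(s):
--     # Reverse the whole string once, then restore each operand run's
--     # internal order; operators land in the right places automatically.
--     ops = "+-*/"
--     out = []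
--     run = []
--     for ch in reversed(s):
--         if ch in ops:
--             out.extend(reversed(run))
--             out.append(ch)
--             run = []
--         else:
--             run.append(ch)
--     out.extend(reversed(run))
--     return "".join(out)
-- ===== Notes on version B (the rewrite author's own statement) =====
-- stated objective: alternative
-- what changed: Instead of pushing operands and operators onto a stack and joining the reversed stack, B scans the reversed string once, emitting operators in place and re-reversing each maximal operand run; it also avoids A's quadratic temp = temp + i string rebuilding.
import Mathlib
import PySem

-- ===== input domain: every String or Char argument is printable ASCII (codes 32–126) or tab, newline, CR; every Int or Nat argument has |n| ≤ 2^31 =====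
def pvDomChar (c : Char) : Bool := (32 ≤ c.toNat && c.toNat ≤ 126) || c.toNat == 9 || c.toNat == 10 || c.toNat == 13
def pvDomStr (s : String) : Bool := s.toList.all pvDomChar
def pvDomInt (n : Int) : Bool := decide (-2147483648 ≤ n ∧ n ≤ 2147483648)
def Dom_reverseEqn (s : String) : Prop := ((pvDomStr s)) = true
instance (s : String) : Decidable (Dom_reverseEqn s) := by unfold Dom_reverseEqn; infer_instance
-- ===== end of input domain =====

-- B reverses the whole string once and re-reverses each operand run, instead of
-- A's token stack joined in reverse; also drops A's per-character string rebuild.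

-- ===== PORT A =====
-- Python's `operator = ["+","-","*","/"]`; chars of s are 1-char strings, so
-- `i in operator` is char membership here.
def pvOpsA : List Char := ['+', '-', '*', '/']

-- the `for i in s` loop, state = (stack, temp)
def pvLoopA (stack : List (List Char)) (temp : List Char) (cs : List Char) :
    List (List Char) × List Char :=
  match cs with
  | [] => (stack, temp)
  | i :: cs =>
    if i ∈ pvOpsA then pvLoopA (stack ++ [temp, [i]]) [] cs
    else pvLoopA stack (temp ++ [i]) cs

def reverseEqn (s : String) : String :=
  let r := pvLoopA [] [] s.toList
  -- stack.append(temp); "".join(stack[::-1])  (slice [::-1] = reverse, exact)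
  String.ofList ((r.1 ++ [r.2]).reverse.flatten)

-- ===== PORT B =====
def pvOpsB : List Char := "+-*/".toList

-- the `for ch in reversed(s)` loop, state = (out, run)
def pvLoopB (out run : List Char) (rs : List Char) : List Char :=
  match rs with
  | [] => out ++ run.reverse
  | c :: rs =>
    if c ∈ pvOpsB then pvLoopB (out ++ run.reverse ++ [c]) [] rs
    else pvLoopB out (run ++ [c]) rs

def reverseEqn_alt (s : String) : String :=
  String.ofList (pvLoopB [] [] s.toList.reverse)

-- ===== PRECONDITION & SPEC =====
def Spec_reverseEqn (s : String) (out : String) : Prop := out = reverseEqn_alt s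
instance (s : String) (out : String) : Decidable (Spec_reverseEqn s out) := by unfold Spec_reverseEqn; infer_instance

-- ===== CLAIM (what is proved, stated in full; the proofs are below) =====
def Claim_equal_reverseEqn : Prop := ∀ (s : String), Dom_reverseEqn s → Spec_reverseEqn s (reverseEqn s)

-- ===== LEMMAS AND PROOFS =====

theorem pvOpsB_eq : pvOpsB = pvOpsA := by decide

-- reference tokenizer: (first token, remaining tokens) of the equation string
def pvTok (cs : List Char) : List Char × List (List Char) :=
  match cs with
  | [] => ([], [])
  | c :: cs =>
    let p := pvTok cs
    if c ∈ pvOpsA then ([], [c] :: p.1 :: p.2) else (c :: p.1, p.2)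

theorem pvTok_opfree (u : List Char) (h : ∀ d ∈ u, d ∉ pvOpsA) :
    pvTok u = (u, []) := by
  induction u with
  | nil => rfl
  | cons c u ih =>
    have hc : c ∉ pvOpsA := h c (List.mem_cons_self ..)
    simp [pvTok, hc, ih (fun d hd => h d (List.mem_cons_of_mem _ hd))]

theorem pvTok_snoc (xs : List Char) (c : Char) (u : List Char)
    (hc : c ∈ pvOpsA) (hu : ∀ d ∈ u, d ∉ pvOpsA) :
    pvTok (xs ++ c :: u) = ((pvTok xs).1, (pvTok xs).2 ++ [[c], u]) := by
  induction xs with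
  | nil => simp [pvTok, hc, pvTok_opfree u hu]
  | cons d xs ih =>
    by_cases hd : d ∈ pvOpsA <;> simp [pvTok, hd, ih]

-- A's result as a structural recursion on the remaining input
def pvARes (t cs : List Char) : List Char :=
  match cs with
  | [] => t
  | c :: cs => if c ∈ pvOpsA then pvARes [] cs ++ c :: t else pvARes (t ++ [c]) cs

theorem pvLoopA_res (cs : List Char) : ∀ stack temp,
    ((pvLoopA stack temp cs).1 ++ [(pvLoopA stack temp cs).2]).reverse.flatten
      = pvARes temp cs ++ stack.reverse.flatten := by
  induction cs with
  | nil => intro stack temp; simp [pvLoopA, pvARes]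
  | cons c cs ih =>
    intro stack temp
    by_cases hc : c ∈ pvOpsA
    · simp only [pvLoopA, if_pos hc]
      rw [ih]
      simp [pvARes, hc]
    · simp only [pvLoopA, if_neg hc]
      rw [ih]
      simp [pvARes, hc]

theorem pvARes_eq (cs : List Char) : ∀ t,
    pvARes t cs = (pvTok cs).2.reverse.flatten ++ t ++ (pvTok cs).1 := by
  induction cs with
  | nil => intro t; simp [pvARes, pvTok]
  | cons c cs ih =>
    intro t
    by_cases hc : c ∈ pvOpsA <;> simp [pvARes, pvTok, hc, ih]

theorem pvLoopB_run (rs : List Char) : ∀ out run,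
    pvLoopB out run rs = out ++ pvLoopB [] run rs := by
  induction rs with
  | nil => intro out run; simp [pvLoopB]
  | cons c rs ih =>
    intro out run
    by_cases hc : c ∈ pvOpsB
    · simp only [pvLoopB, if_pos hc]
      rw [ih, ih ([] ++ run.reverse ++ [c]) []]
      simp
    · simp only [pvLoopB, if_neg hc]
      rw [ih]

theorem pvLoopB_eq (rs : List Char) : ∀ run, (∀ d ∈ run, d ∉ pvOpsA) →
    pvLoopB [] run rs
      = (pvTok (rs.reverse ++ run.reverse)).2.reverse.flatten
          ++ (pvTok (rs.reverse ++ run.reverse)).1 := by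
  induction rs with
  | nil =>
    intro run hrun
    have : ∀ d ∈ run.reverse, d ∉ pvOpsA := by
      intro d hd; exact hrun d (List.mem_reverse.mp hd)
    simp [pvLoopB, pvTok_opfree run.reverse this]
  | cons c rs ih =>
    intro run hrun
    by_cases hc : c ∈ pvOpsA
    · have hcB : c ∈ pvOpsB := by rw [pvOpsB_eq]; exact hc
      have hu : ∀ d ∈ run.reverse, d ∉ pvOpsA := by
        intro d hd; exact hrun d (List.mem_reverse.mp hd)
      have hsnoc := pvTok_snoc rs.reverse c run.reverse hc hu
      simp only [pvLoopB, if_pos hcB]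
      rw [pvLoopB_run, ih [] (by simp)]
      simp [hsnoc]
    · have hcB : c ∉ pvOpsB := by rw [pvOpsB_eq]; exact hc
      simp only [pvLoopB, if_neg hcB]
      rw [ih (run ++ [c]) (by
        intro d hd
        rcases List.mem_append.mp hd with h | h
        · exact hrun d h
        · simp at h; subst h; exact hc)]
      simp

-- ===== VERDICT (by name: the statement is the Claim_ definition above) =====
theorem reverseEqn_spec : Claim_equal_reverseEqn := by
  intro s _
  simp only [Spec_reverseEqn, reverseEqn, reverseEqn_alt]
  rw [pvLoopB_eq s.toList.reverse [] (by simp), pvLoopA_res, pvARes_eq]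
  simp
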